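-- pv_equiv track=rewrite | github.com/krishna0604/group_9_projesi | src/algorithms/variable_neighborhood_search.py | remove_loops
-- ===== SOURCE A (Python) =====
-- def remove_loops(path):
--     """Yoldan döngüleri kaldırır (örn. A-B-C-B-D'yi A-B-D yapar)."""
--     if not path:
--         return []
--
--     seen = {}
--     new_path = []
--
--     for node in path:
--         if node in seen:
--             # Döngü bulundu, döngü noktasından mevcut düğüme kadar tüm düğümleri kaldır
--             start_index = seen[node]
--             new_path = new_path[:start_index]
--             seen = {n: i for i, n in enumerate(new_path)} # Görülenleri sıfırla
--
--         seen[node] = len(new_path)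
--         new_path.append(node)
--
--     return new_path
-- ===== SOURCE B (Python) =====
-- def remove_loops(path):
--     """Stack-based cycle removal: pop back through the repeated node, then re-push it."""
--     stack = []
--     on_stack = set()
--     for node in path:
--         if node in on_stack:
--             while True:
--                 top = stack.pop()
--                 on_stack.discard(top)
--                 if top == node:
--                     break
--         stack.append(node)
--         on_stack.add(node)
--     return stack
-- ===== Notes on version B (the rewrite author's own statement) =====
-- stated objective: faster
-- what changed: Replaces A's slice-and-rebuild (on each detected cycle A slices new_path and rebuilds the whole seen dict by re-enumerating it) with a stack plus membership set that pops removed tail nodes one by one, so each element is pushed and popped at most once (amortized O(n)).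
import Mathlib
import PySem

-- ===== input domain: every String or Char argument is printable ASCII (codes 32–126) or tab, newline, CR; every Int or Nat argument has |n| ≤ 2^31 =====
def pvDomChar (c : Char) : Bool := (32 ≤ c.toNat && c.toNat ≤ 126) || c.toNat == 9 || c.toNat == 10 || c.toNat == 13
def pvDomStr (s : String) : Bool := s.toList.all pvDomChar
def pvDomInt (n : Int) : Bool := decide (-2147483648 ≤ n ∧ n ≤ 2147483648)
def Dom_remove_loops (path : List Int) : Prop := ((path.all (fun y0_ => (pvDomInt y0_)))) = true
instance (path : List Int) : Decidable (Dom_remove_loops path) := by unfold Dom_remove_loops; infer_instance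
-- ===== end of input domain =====

-- B replaces A's slice-then-rebuild of the seen dict with a stack and a membership set,
-- popping removed tail nodes one by one (each node pushed/popped at most once); timing run measured B faster.

-- ===== PORT A =====
-- {n: i for i, n in enumerate(new_path)}
def seenOfEnum (l : List Int) : PySem.Dict Int Int :=
  (PySem.List.enumerate l).foldl (fun d p => d.insert p.2 p.1) PySem.Dict.empty

-- one iteration of A's for-loop over (seen, new_path)
def stepA (st : PySem.Dict Int Int × List Int) (node : Int) :
    PySem.Dict Int Int × List Int :=
  let (seen, np) := st
  let (seen, np) :=
    match seen.get? node with
    | some si =>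
        let np' := PySem.List.slice np none (some si)
        (seenOfEnum np', np')
    | none => (seen, np)
  (seen.insert node (np.length : Int), np ++ [node])

def remove_loops (path : List Int) : List Int :=
  if path = [] then []
  else (path.foldl stepA (PySem.Dict.empty, [])).2

-- ===== PORT B =====
-- 'while True: top = stack.pop(); on_stack.discard(top); if top == node: break'
def popUntil : List Int → PySem.Set Int → Int → List Int × PySem.Set Int
  | [], s, _ => ([], s)   -- unreachable in B (node is on the stack); total guard
  | x :: xs, s, node =>
      let top := (x :: xs).getLast (by simp)
      let stack' := (x :: xs).dropLast
      let s' := PySem.Set.discard s top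
      if top = node then (stack', s') else popUntil stack' s' node
  termination_by stack _ _ => stack.length
  decreasing_by simp

-- one iteration of B's for-loop over (stack, on_stack)
def stepB (st : List Int × PySem.Set Int) (node : Int) :
    List Int × PySem.Set Int :=
  let (stack, s) := st
  let (stack, s) :=
    if PySem.Set.contains s node then popUntil stack s node else (stack, s)
  (stack ++ [node], PySem.Set.add s node)

def remove_loops_alt (path : List Int) : List Int :=
  (path.foldl stepB ([], PySem.Set.empty)).1

-- ===== PRECONDITION & SPEC =====
def Spec_remove_loops (path : List Int) (out : List Int) : Prop := out = remove_loops_alt path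
instance (path : List Int) (out : List Int) : Decidable (Spec_remove_loops path out) := by unfold Spec_remove_loops; infer_instance

-- ===== CLAIM (what is proved, stated in full; the proofs are below) =====
def Claim_equal_remove_loops : Prop := ∀ (path : List Int), Dom_remove_loops path → Spec_remove_loops path (remove_loops path)

-- ===== LEMMAS AND PROOFS =====

-- the dict comprehension over a Nodup list maps x to its index (offset by the start)
lemma get?_seenFold (l : List Int) : ∀ (s0 : Int) (d : PySem.Dict Int Int) (x : Int),
    l.Nodup →
    ((PySem.List.enumerate l s0).foldl (fun d p => d.insert p.2 p.1) d).get? x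
      = if x ∈ l then some (s0 + (l.idxOf x : Int)) else d.get? x := by
  induction l with
  | nil => intro s0 d x _; simp [PySem.List.enumerate_nil]
  | cons a t ih =>
    intro s0 d x hnd
    rw [PySem.List.enumerate_cons]
    simp only [List.foldl_cons]
    have hnd' := hnd
    rw [List.nodup_cons] at hnd'
    rw [ih (s0 + 1) _ x hnd'.2]
    by_cases hxa : x = a
    · subst hxa
      have hx : x ∉ t := hnd'.1
      simp [hx, PySem.Dict.get?_insert_self, List.idxOf_cons_self]
    · by_cases hxt : x ∈ t
      · simp [hxt, hxa, List.idxOf_cons_ne _ (by exact fun h => hxa h.symm)]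
        ring
      · simp [hxt, hxa, PySem.Dict.get?_insert_of_ne _ _ hxa]

lemma get?_seenOfEnum (l : List Int) (x : Int) (h : l.Nodup) :
    (seenOfEnum l).get? x = if x ∈ l then some ((l.idxOf x : Int)) else none := by
  unfold seenOfEnum
  rw [get?_seenFold l 0 PySem.Dict.empty x h]
  simp [PySem.Dict.get?_empty]

lemma popUntil_append (l : List Int) (a : Int) (s : PySem.Set Int) (node : Int) :
    popUntil (l ++ [a]) s node
      = if a = node then (l, PySem.Set.discard s a)
        else popUntil l (PySem.Set.discard s a) node := by
  cases hl : l ++ [a] with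
  | nil => simp at hl
  | cons y ys =>
    rw [popUntil]
    have h1 : (y :: ys).getLast (by simp) = a := by
      have h' : (y :: ys).getLast? = some a := by
        rw [← hl]; exact List.getLast?_concat
      simp [List.getLast?_eq_some_getLast] at h'; exact h'
    have h2 : (y :: ys).dropLast = l := by
      have := congrArg List.dropLast hl
      simpa using this.symm
    simp only [h1, h2]

-- popping back through node (unique on the Nodup stack) truncates before node's index
lemma popUntil_spec (np : List Int) : ∀ (s : PySem.Set Int) (node : Int),
    np.Nodup → node ∈ np → (∀ x, x ∈ s ↔ x ∈ np) →
    (popUntil np s node).1 = np.take (np.idxOf node)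
    ∧ (∀ x, x ∈ (popUntil np s node).2 ↔ x ∈ np.take (np.idxOf node)) := by
  induction np using List.reverseRecOn with
  | nil => intro s node _ hmem _; simp at hmem
  | append_singleton l a ih =>
    intro s node hnd hmem hs
    have hal : a ∉ l := by
      intro h
      exact (List.nodup_append.mp hnd).2.2 a h a (by simp) rfl
    rw [popUntil_append]
    by_cases han : a = node
    · subst han
      have hidx : (l ++ [a]).idxOf a = l.length := by
        rw [List.idxOf_append_of_notMem hal]; simp
      rw [if_pos rfl]
      simp only [hidx]
      constructor
      · simp [List.take_append_of_le_length (le_refl l.length)]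
      · intro x
        rw [PySem.Set.mem_discard, hs x]
        rw [List.take_append_of_le_length (le_refl l.length), List.take_length]
        simp only [List.mem_append, List.mem_singleton]
        constructor
        · rintro ⟨h1 | h1, h2⟩
          · exact h1
          · exact absurd h1 h2
        · intro h; exact ⟨Or.inl h, fun he => hal (he ▸ h)⟩
    · have hmem' : node ∈ l := by
        rcases List.mem_append.mp hmem with h | h
        · exact h
        · simp at h; exact absurd h.symm han
      have hidx : (l ++ [a]).idxOf node = l.idxOf node := List.idxOf_append_of_mem hmem'
      have hle : l.idxOf node ≤ l.length := le_of_lt (List.idxOf_lt_length_of_mem hmem')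
      have htk : (l ++ [a]).take ((l ++ [a]).idxOf node) = l.take (l.idxOf node) := by
        rw [hidx, List.take_append_of_le_length hle]
      rw [if_neg han]
      have hnd' : l.Nodup := (List.nodup_append.mp hnd).1
      have hs' : ∀ x, x ∈ PySem.Set.discard s a ↔ x ∈ l := by
        intro x
        rw [PySem.Set.mem_discard, hs x]
        simp only [List.mem_append, List.mem_singleton]
        constructor
        · rintro ⟨h1 | h1, h2⟩
          · exact h1
          · exact absurd h1 h2
        · intro h; exact ⟨Or.inl h, fun he => hal (he ▸ h)⟩
      obtain ⟨h1, h2⟩ := ih (PySem.Set.discard s a) node hnd' hmem' hs'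
      rw [htk]
      exact ⟨h1, h2⟩

-- main invariant: A's (seen, new_path) and B's (stack, on_stack) stay in lockstep
lemma fold_agree (path : List Int) : ∀ (seen : PySem.Dict Int Int) (np : List Int) (s : PySem.Set Int),
    np.Nodup →
    (∀ x, seen.get? x = if x ∈ np then some ((np.idxOf x : Int)) else none) →
    (∀ x, x ∈ s ↔ x ∈ np) →
    (path.foldl stepA (seen, np)).2 = (path.foldl stepB (np, s)).1
    ∧ (path.foldl stepA (seen, np)).2.Nodup
      := by
  induction path with
  | nil => intro seen np s hnd _ _; exact ⟨rfl, hnd⟩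
  | cons node rest ih =>
    intro seen np s hnd hseen hs
    simp only [List.foldl_cons]
    by_cases hm : node ∈ np
    · -- loop detected in both programs
      have hslice : PySem.List.slice np none (some ((np.idxOf node : Nat) : Int)) = np.take (np.idxOf node) := by
        rw [PySem.List.slice_to_natCast]
      have hA : stepA (seen, np) node
          = ((seenOfEnum (np.take (np.idxOf node))).insert node ((np.take (np.idxOf node)).length : Int),
             np.take (np.idxOf node) ++ [node]) := by
        simp only [stepA, hseen node, if_pos hm, hslice]
      have hcont : PySem.Set.contains s node = true := by
        exact (PySem.Set.contains_iff s node).mpr ((hs node).mpr hm)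
      obtain ⟨hp1, hp2⟩ := popUntil_spec np s node hnd hm hs
      have hB : stepB (np, s) node
          = (np.take (np.idxOf node) ++ [node], PySem.Set.add (popUntil np s node).2 node) := by
        simp only [stepB, hcont, if_true]
        rw [show popUntil np s node = ((popUntil np s node).1, (popUntil np s node).2) from rfl, hp1]
      rw [hA, hB]
      -- re-establish the invariant on the truncated state
      set np' := np.take (np.idxOf node) with hnp'
      have hnd' : np'.Nodup := hnd.sublist (List.take_sublist _ _)
      have hnode' : node ∉ np' := by
        intro h
        have := (List.idxOf_lt_length_iff (l := np')).mpr h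
        have hlen : np'.length ≤ np.idxOf node := by simp [hnp']
        have h2 : np'.idxOf node = np.idxOf node := by
          have := List.IsPrefix.idxOf_eq_of_mem (List.take_prefix _ _) h
          exact this
        omega
      have hndA : (np' ++ [node]).Nodup := by
        rw [List.nodup_append]
        refine ⟨hnd', List.nodup_singleton _, ?_⟩
        intro a ha b hb
        simp only [List.mem_singleton] at hb
        subst hb
        exact fun h => hnode' (h ▸ ha)
      apply ih
      · exact hndA
      · intro x
        by_cases hx : x = node
        · rw [hx, PySem.Dict.get?_insert_self]
          have hidx : (np' ++ [node]).idxOf node = np'.length := by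
            rw [List.idxOf_append_of_notMem hnode']; simp
          simp [hidx]
        · rw [PySem.Dict.get?_insert_of_ne _ _ hx, get?_seenOfEnum _ _ hnd']
          by_cases hxm : x ∈ np'
          · have : (np' ++ [node]).idxOf x = np'.idxOf x := List.idxOf_append_of_mem hxm
            simp [hxm, this]
          · have : x ∉ np' ++ [node] := by simp [hxm, hx]
            simp [hxm, this]
      · intro x
        rw [PySem.Set.mem_add, hp2 x]
        simp only [List.mem_append, List.mem_singleton]
    · -- fresh node in both programs
      have hA : stepA (seen, np) node = (seen.insert node (np.length : Int), np ++ [node]) := by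
        simp only [stepA, hseen node, if_neg hm]
      have hcont : PySem.Set.contains s node = false := by
        rw [Bool.eq_false_iff]
        intro h
        exact hm ((hs node).mp ((PySem.Set.contains_iff s node).mp h))
      have hns : node ∉ s := fun h => hm ((hs node).mp h)
      have hB : stepB (np, s) node = (np ++ [node], PySem.Set.add s node) := by
        simp [stepB, hns]
      rw [hA, hB]
      have hndA : (np ++ [node]).Nodup := by
        rw [List.nodup_append]
        refine ⟨hnd, List.nodup_singleton _, ?_⟩
        intro a ha b hb
        simp only [List.mem_singleton] at hb
        subst hb
        exact fun h => hm (h ▸ ha)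
      apply ih
      · exact hndA
      · intro x
        by_cases hx : x = node
        · rw [hx, PySem.Dict.get?_insert_self]
          have hidx : (np ++ [node]).idxOf node = np.length := by
            rw [List.idxOf_append_of_notMem hm]; simp
          simp [hidx]
        · rw [PySem.Dict.get?_insert_of_ne _ _ hx, hseen x]
          by_cases hxm : x ∈ np
          · have : (np ++ [node]).idxOf x = np.idxOf x := List.idxOf_append_of_mem hxm
            simp [hxm, this]
          · have : x ∉ np ++ [node] := by simp [hxm, hx]
            simp [hxm, this]
      · intro x
        rw [PySem.Set.mem_add, hs x]
        simp only [List.mem_append, List.mem_singleton]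

-- ===== VERDICT (by name: the statement is the Claim_ definition above) =====
theorem remove_loops_spec : Claim_equal_remove_loops := by
  intro path _
  unfold Spec_remove_loops remove_loops remove_loops_alt
  by_cases hp : path = []
  · subst hp; simp
  · rw [if_neg hp]
    exact (fold_agree path PySem.Dict.empty [] PySem.Set.empty (by simp)
      (by intro x; simp [PySem.Dict.get?_empty]) (by intro x; simp [PySem.Set.empty])).1
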